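-- pv_equiv track=rewrite | github.com/jkkummerfeld/text2sql-data | systems/baseline-template/text2sql-template-baseline.py | insert_tagged_tokens
-- ===== SOURCE A (Python) =====
-- def insert_tagged_tokens(tokens, tags, template):
--     to_insert = {}
--     cur = (None, [])
--     for token, tag in zip(tokens, tags):
--         if tag != cur[0]:
--             if cur[0] is not None:
--                 value = ' '.join(cur[1])
--                 to_insert[cur[0]] = value
--             if tag == 'O':
--                 cur = (None, [])
--             else:
--                 cur = (tag, [token])
--         else:
--             cur[1].append(token)
--     if cur[0] is not None:
--         value = ' '.join(cur[1])
--         to_insert[cur[0]] = value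
--
--     modified = []
--     for token in template.split():
--         modified.append(to_insert.get(token, token))
--
--     return ' '.join(modified)
-- ===== SOURCE B (Python) =====
-- def insert_tagged_tokens(tokens, tags, template):
--     to_insert = {}
--     n = min(len(tokens), len(tags))
--     i = 0
--     while i < n:
--         tag = tags[i]
--         j = i + 1
--         while j < n and tags[j] == tag:
--             j += 1
--         if tag != 'O':
--             to_insert[tag] = ' '.join(tokens[i:j])
--         i = j
--     return ' '.join(to_insert.get(w, w) for w in template.split())
-- ===== Notes on version B (the rewrite author's own statement) =====
-- stated objective: simpler
-- what changed: Replaced A's flush-on-change state machine (carried (tag, accumulator) pair updated per token plus a trailing final flush) by an index loop that spans each maximal run of consecutive equal tags and inserts the joined token slice for the run in one step; the template-filling phase is unchanged.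
import Mathlib
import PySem

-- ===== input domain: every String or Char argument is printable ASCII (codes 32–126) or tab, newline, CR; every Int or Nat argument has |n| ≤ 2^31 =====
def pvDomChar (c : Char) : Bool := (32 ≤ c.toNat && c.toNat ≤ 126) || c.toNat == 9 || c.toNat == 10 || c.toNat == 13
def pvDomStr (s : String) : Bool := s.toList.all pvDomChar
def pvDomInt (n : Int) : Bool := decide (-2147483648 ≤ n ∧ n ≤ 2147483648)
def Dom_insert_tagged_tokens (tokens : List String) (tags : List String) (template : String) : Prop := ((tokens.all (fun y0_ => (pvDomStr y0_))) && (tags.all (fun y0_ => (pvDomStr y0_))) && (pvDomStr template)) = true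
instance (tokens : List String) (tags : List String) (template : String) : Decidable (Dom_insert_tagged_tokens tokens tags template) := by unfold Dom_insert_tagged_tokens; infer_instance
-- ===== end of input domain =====

-- B replaces A's flush-on-change state machine (carried (tag, accumulator) pair plus a
-- trailing final flush) by an index loop that spans each maximal run of equal tags and
-- inserts its joined token span at once; objective: simpler. Same return value.

-- ===== PORT A =====
-- flush: `to_insert[cur[0]] = ' '.join(cur[1])` when cur[0] is not None
def pvFlushA (d : PySem.Dict String String) (cur : Option String × List String) :
    PySem.Dict String String :=
  match cur.1 with
  | none => d
  | some k => d.insert k (PySem.Str.join " " cur.2)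

-- the body of A's `for token, tag in zip(tokens, tags)` loop
def pvStepA (st : PySem.Dict String String × (Option String × List String)) (p : String × String) :
    PySem.Dict String String × (Option String × List String) :=
  if st.2.1 = some p.2 then
    (st.1, (st.2.1, st.2.2 ++ [p.1]))
  else
    let d' := pvFlushA st.1 st.2
    if p.2 = "O" then (d', (none, [])) else (d', (some p.2, [p.1]))

def insert_tagged_tokens (tokens : List String) (tags : List String) (template : String) : String :=
  let st := (tokens.zip tags).foldl pvStepA (PySem.Dict.empty, (none, []))
  let d := pvFlushA st.1 st.2
  PySem.Str.join " " ((PySem.Str.split₀ template).map (fun t => d.getD t t))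

-- ===== PORT B =====
-- the inner `while j < n and tags[j] == tag: j += 1` loop; the fuel argument only bounds
-- the number of iterations (n is always enough), the loop's own test is unchanged;
-- tags[j] with j < n ≤ len(tags) is always in range, so `tags.getD j ""` is exact
def pvRunEnd (tags : List String) (n : Nat) (tag : String) : Nat → Nat → Nat
  | 0, j => j
  | fuel + 1, j =>
      if j < n ∧ tags.getD j "" == tag then pvRunEnd tags n tag fuel (j + 1) else j

-- B's outer `while i < n` loop (fuel = n bounds the iterations; the test is unchanged);
-- B's locals `tag` and `j` are inlined; tokens[i:j] with 0 ≤ i ≤ j is (tokens.drop i).take (j - i)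
def pvLoopB (tokens tags : List String) (n : Nat) :
    Nat → Nat → PySem.Dict String String → PySem.Dict String String
  | 0, _, d => d
  | fuel + 1, i, d =>
      if i < n then
        pvLoopB tokens tags n fuel (pvRunEnd tags n (tags.getD i "") n (i + 1))
          (if tags.getD i "" = "O" then d
           else d.insert (tags.getD i "")
             (PySem.Str.join " "
               ((tokens.drop i).take (pvRunEnd tags n (tags.getD i "") n (i + 1) - i))))
      else d

def insert_tagged_tokens_alt (tokens : List String) (tags : List String) (template : String) : String :=
  let n := min tokens.length tags.length
  let d := pvLoopB tokens tags n n 0 PySem.Dict.empty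
  PySem.Str.join " " ((PySem.Str.split₀ template).map (fun t => d.getD t t))

-- ===== PRECONDITION & SPEC =====
def Spec_insert_tagged_tokens (tokens : List String) (tags : List String) (template : String) (out : String) : Prop := out = insert_tagged_tokens_alt tokens tags template
instance (tokens : List String) (tags : List String) (template : String) (out : String) : Decidable (Spec_insert_tagged_tokens tokens tags template out) := by unfold Spec_insert_tagged_tokens; infer_instance

-- ===== CLAIM (what is proved, stated in full; the proofs are below) =====
def Claim_equal_insert_tagged_tokens : Prop := ∀ (tokens : List String) (tags : List String) (template : String), Dom_insert_tagged_tokens tokens tags template → Spec_insert_tagged_tokens tokens tags template (insert_tagged_tokens tokens tags template)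

-- ===== LEMMAS AND PROOFS =====

-- reference form of B's loop: recursion on the zipped pairs, spanning one run per step
def pvBuildB : List (String × String) → PySem.Dict String String → PySem.Dict String String
  | [], d => d
  | (tok, tg) :: rest, d =>
      pvBuildB (rest.dropWhile (fun p => p.2 == tg))
        (if tg = "O" then d
         else d.insert tg (PySem.Str.join " " (tok :: (rest.takeWhile (fun p => p.2 == tg)).map Prod.fst)))
termination_by ps => ps.length
decreasing_by
  exact Nat.lt_succ_of_le (List.length_dropWhile_le _ _)

-- A's final dictionary from an arbitrary loop state
def pvDictA (ps : List (String × String)) (st : PySem.Dict String String × (Option String × List String)) :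
    PySem.Dict String String :=
  let r := ps.foldl pvStepA st
  pvFlushA r.1 r.2

-- consuming a run of the current tag just extends the accumulator
theorem pvRunA (t : String) (grp : List (String × String)) (h : ∀ p ∈ grp, p.2 = t) :
    ∀ (rest : List (String × String)) (d : PySem.Dict String String) (acc : List String),
      (grp ++ rest).foldl pvStepA (d, (some t, acc))
        = rest.foldl pvStepA (d, (some t, acc ++ grp.map Prod.fst)) := by
  induction grp with
  | nil => intro rest d acc; simp
  | cons p grp ih =>
      intro rest d acc
      have hp : p.2 = t := h p (List.mem_cons_self)
      have hgrp : ∀ q ∈ grp, q.2 = t := fun q hq => h q (List.mem_cons_of_mem _ hq)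
      have hc : pvStepA (d, (some t, acc)) p = (d, (some t, acc ++ [p.1])) := by
        simp [pvStepA, hp]
      simp only [List.cons_append, List.foldl_cons, hc]
      rw [ih hgrp]
      simp

-- consuming a run of 'O' tags from the idle state is a no-op
theorem pvRunO (grp : List (String × String)) (h : ∀ p ∈ grp, p.2 = "O") :
    ∀ (rest : List (String × String)) (d : PySem.Dict String String),
      (grp ++ rest).foldl pvStepA (d, (none, []))
        = rest.foldl pvStepA (d, (none, [])) := by
  induction grp with
  | nil => intro rest d; simp
  | cons p grp ih =>
      intro rest d
      have hp : p.2 = "O" := h p (List.mem_cons_self)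
      have hgrp : ∀ q ∈ grp, q.2 = "O" := fun q hq => h q (List.mem_cons_of_mem _ hq)
      simp only [List.cons_append, List.foldl_cons, pvStepA]
      rw [if_neg (by simp), if_pos hp, pvFlushA]
      exact ih hgrp rest d

-- flushing a pending span equals inserting it up front, provided the next tag differs
theorem pvStepB (ps : List (String × String)) (t : String) (acc : List String)
    (hhead : ∀ x ∈ ps.head?, x.2 ≠ t)
    (ha : ∀ d', pvDictA ps (d', (none, [])) = pvBuildB ps d') (d : PySem.Dict String String) :
    pvDictA ps (d, (some t, acc)) = pvBuildB ps (d.insert t (PySem.Str.join " " acc)) := by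
  cases ps with
  | nil => simp [pvDictA, pvFlushA, pvBuildB]
  | cons p rest =>
      have hp : p.2 ≠ t := hhead p (by simp)
      rw [← ha (d.insert t (PySem.Str.join " " acc))]
      simp only [pvDictA, List.foldl_cons, pvStepA, pvFlushA]
      rw [if_neg (show ¬ ((some t : Option String) = some p.2) from by simpa using fun h => hp h.symm)]
      simp

-- main invariant: from the idle state A builds exactly pvBuildB's dictionary
theorem pvMain : ∀ (n : Nat) (ps : List (String × String)), ps.length ≤ n →
    ∀ d, pvDictA ps (d, (none, [])) = pvBuildB ps d := by
  intro n
  induction n with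
  | zero =>
      intro ps hps d
      have : ps = [] := List.length_eq_zero_iff.mp (Nat.le_zero.mp hps)
      subst this; simp [pvDictA, pvFlushA, pvBuildB]
  | succ n ih =>
      intro ps hps d
      cases ps with
      | nil => simp [pvDictA, pvFlushA, pvBuildB]
      | cons p rest =>
          obtain ⟨tok, tg⟩ := p
          have hlen : rest.length ≤ n := Nat.le_of_succ_le_succ hps
          have hsplit : rest.takeWhile (fun p => p.2 == tg) ++ rest.dropWhile (fun p => p.2 == tg) = rest :=
            List.takeWhile_append_dropWhile
          have hgrp : ∀ q ∈ rest.takeWhile (fun p => p.2 == tg), q.2 = tg := by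
            intro q hq
            simpa using List.mem_takeWhile_imp hq
          have hlen' : (rest.dropWhile (fun p => p.2 == tg)).length ≤ n :=
            le_trans (List.length_dropWhile_le _ _) hlen
          have hhead : ∀ x ∈ (rest.dropWhile (fun p => p.2 == tg)).head?, x.2 ≠ tg := by
            intro x hx
            have := List.head?_dropWhile_not (p := fun p => p.2 == tg) (l := rest)
            cases hd : (rest.dropWhile (fun p => p.2 == tg)).head? with
            | none => simp [hd] at hx
            | some y =>
                rw [hd] at hx this
                simp at hx this
                subst hx; exact this
          have e1 : pvDictA ((tok, tg) :: rest) (d, (none, []))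
              = pvDictA rest (pvStepA (d, (none, [])) (tok, tg)) := rfl
          by_cases htg : tg = "O"
          · subst htg
            have estep : pvStepA (d, (none, [])) (tok, "O") = (d, (none, [])) := by
              simp [pvStepA, pvFlushA]
            rw [e1, estep, ← hsplit]
            have hgrpO : ∀ q ∈ rest.takeWhile (fun p => p.2 == ("O" : String)), q.2 = "O" := hgrp
            have e2 : pvDictA (rest.takeWhile (fun p => p.2 == ("O" : String)) ++ rest.dropWhile (fun p => p.2 == ("O" : String))) (d, (none, []))
                = pvDictA (rest.dropWhile (fun p => p.2 == ("O" : String))) (d, (none, [])) := by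
              unfold pvDictA
              rw [pvRunO _ hgrpO]
            rw [e2, ih _ hlen' d]
            conv_rhs => rw [pvBuildB]
            rw [hsplit]
            simp
          · have estep : pvStepA (d, (none, [])) (tok, tg) = (d, (some tg, [tok])) := by
              simp [pvStepA, pvFlushA, htg]
            rw [e1, estep]
            conv_lhs => rw [← hsplit]
            have e2 : pvDictA (rest.takeWhile (fun p => p.2 == tg) ++ rest.dropWhile (fun p => p.2 == tg)) (d, (some tg, [tok]))
                = pvDictA (rest.dropWhile (fun p => p.2 == tg)) (d, (some tg, tok :: (rest.takeWhile (fun p => p.2 == tg)).map Prod.fst)) := by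
              unfold pvDictA
              rw [pvRunA tg _ hgrp]
              simp
            rw [e2, pvStepB _ tg _ hhead (fun d' => ih _ hlen' d') d]
            conv_rhs => rw [pvBuildB]
            simp [htg]

-- dropWhile is drop by the length of takeWhile
theorem pvDropWhile_eq_drop {α : Type} (p : α → Bool) (l : List α) :
    l.dropWhile p = l.drop (l.takeWhile p).length := by
  set L := (l.takeWhile p).length with hL
  apply List.append_cancel_left (as := l.takeWhile p)
  conv_rhs => rw [List.prefix_iff_eq_take.mp (List.takeWhile_prefix p), ← hL]
  rw [List.takeWhile_append_dropWhile, List.take_append_drop]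

-- the inner while loop scans exactly the run of equal tags in the zipped pairs
theorem pvRunEnd_eq (tokens tags : List String) (tag : String) :
    ∀ (fuel j : Nat), j ≤ (tokens.zip tags).length → (tokens.zip tags).length - j ≤ fuel →
      pvRunEnd tags ((tokens.zip tags).length) tag fuel j
        = j + (((tokens.zip tags).drop j).takeWhile (fun p => p.2 == tag)).length := by
  intro fuel
  induction fuel with
  | zero =>
      intro j hj hk
      have hjn : j = (tokens.zip tags).length := by omega
      rw [pvRunEnd, hjn, List.drop_length]
      simp
  | succ fuel ih =>
      intro j hj hk
      by_cases hjn : j < (tokens.zip tags).length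
      · have hj_tags : j < tags.length := by
          have := List.length_zip (l₁ := tokens) (l₂ := tags); omega
        have hget : ((tokens.zip tags)[j]'hjn).2 = tags.getD j "" := by
          rw [List.getElem_zip, List.getD_eq_getElem _ _ hj_tags]
        rw [List.drop_eq_getElem_cons hjn]
        rw [pvRunEnd]
        by_cases htag : (tags.getD j "" == tag) = true
        · rw [if_pos ⟨hjn, htag⟩]
          rw [ih (j + 1) (by omega) (by omega)]
          rw [List.takeWhile_cons_of_pos (by rw [hget]; exact htag)]
          simp
          omega
        · rw [if_neg (fun hc => htag hc.2)]
          rw [List.takeWhile_cons_of_neg (by rw [hget]; simpa using htag)]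
          simp
      · have hjn' : j = (tokens.zip tags).length := by omega
        rw [pvRunEnd, if_neg (by omega)]
        rw [hjn', List.drop_length]
        simp

-- a token slice is the first projection of the corresponding slice of the zipped pairs
theorem pvSliceMapFst (tokens tags : List String) (i m : Nat)
    (h : i + m ≤ (tokens.zip tags).length) :
    (tokens.drop i).take m = (((tokens.zip tags).drop i).take m).map Prod.fst := by
  have hlen : (tokens.zip tags).length = min tokens.length tags.length := List.length_zip
  apply List.ext_getElem
  · simp; omega
  · intro k h1 h2
    simp [List.getElem_take, List.getElem_drop, List.getElem_zip]

-- bridge: the index loop equals the run recursion on the zipped pairs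
theorem pvLoopB_eq (tokens tags : List String) :
    ∀ (fuel i : Nat), i ≤ (tokens.zip tags).length → (tokens.zip tags).length - i ≤ fuel →
      ∀ d, pvLoopB tokens tags ((tokens.zip tags).length) fuel i d
        = pvBuildB ((tokens.zip tags).drop i) d := by
  intro fuel
  induction fuel with
  | zero =>
      intro i hi hk d
      have hin : i = (tokens.zip tags).length := by omega
      rw [pvLoopB, hin, List.drop_length]
      simp [pvBuildB]
  | succ fuel ih =>
      intro i hi hk d
      by_cases hin : i < (tokens.zip tags).length
      · have hi_tags : i < tags.length := by
          have := List.length_zip (l₁ := tokens) (l₂ := tags); omega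
        have hgi : ((tokens.zip tags)[i]'hin) = (tokens[i]'(by
            have := List.length_zip (l₁ := tokens) (l₂ := tags); omega), tags.getD i "") := by
          rw [List.getElem_zip, List.getD_eq_getElem _ _ hi_tags]
        have hdrop : (tokens.zip tags).drop i
            = ((tokens.zip tags)[i]'hin) :: (tokens.zip tags).drop (i + 1) :=
          List.drop_eq_getElem_cons hin
        have hrun := pvRunEnd_eq tokens tags (tags.getD i "") (tokens.zip tags).length (i + 1)
          (by omega) (by omega)
        set L := (((tokens.zip tags).drop (i + 1)).takeWhile (fun p => p.2 == tags.getD i "")).length with hLdef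
        have hLle : L ≤ (tokens.zip tags).length - (i + 1) := by
          have h5 := (List.takeWhile_prefix (l := (tokens.zip tags).drop (i + 1))
            (fun p => p.2 == tags.getD i "")).length_le
          rw [List.length_drop, ← hLdef] at h5
          exact h5
        have htake : ((tokens.zip tags).drop (i + 1)).takeWhile (fun p => p.2 == tags.getD i "")
            = ((tokens.zip tags).drop (i + 1)).take L :=
          List.prefix_iff_eq_take.mp (List.takeWhile_prefix _)
        have hslice : (tokens.drop i).take (L + 1)
            = (((tokens.zip tags).drop i).take (L + 1)).map Prod.fst :=
          pvSliceMapFst tokens tags i (L + 1) (by omega)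
        have hslice2 : (((tokens.zip tags).drop i).take (L + 1)).map Prod.fst
            = (tokens[i]'(by have := List.length_zip (l₁ := tokens) (l₂ := tags); omega))
              :: (((tokens.zip tags).drop (i + 1)).takeWhile (fun p => p.2 == tags.getD i "")).map Prod.fst := by
          rw [hdrop, List.take_succ_cons, hgi, htake]
          simp
        have hdw : ((tokens.zip tags).drop (i + 1)).dropWhile (fun p => p.2 == tags.getD i "")
            = (tokens.zip tags).drop (i + 1 + L) := by
          rw [pvDropWhile_eq_drop, ← hLdef, List.drop_drop]
        rw [pvLoopB, if_pos hin]
        rw [hrun]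
        have harith : i + 1 + L - i = L + 1 := by omega
        rw [harith]
        rw [ih (i + 1 + L) (by omega) (by omega)]
        rw [← hdw]
        conv_rhs => rw [hdrop, hgi, pvBuildB]
        rw [hslice, hslice2]
      · have hin' : i = (tokens.zip tags).length := by omega
        rw [pvLoopB, if_neg (by omega), hin', List.drop_length]
        simp [pvBuildB]

-- ===== VERDICT (by name: the statement is the Claim_ definition above) =====
theorem insert_tagged_tokens_spec : Claim_equal_insert_tagged_tokens := by
  intro tokens tags template _
  unfold Spec_insert_tagged_tokens insert_tagged_tokens insert_tagged_tokens_alt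
  have hmin : (tokens.zip tags).length = min tokens.length tags.length := List.length_zip
  have h1 := pvMain (tokens.zip tags).length (tokens.zip tags) le_rfl PySem.Dict.empty
  have h2 := pvLoopB_eq tokens tags (tokens.zip tags).length 0 (Nat.zero_le _) (by omega) PySem.Dict.empty
  rw [List.drop_zero] at h2
  unfold pvDictA at h1
  have hd : pvFlushA ((tokens.zip tags).foldl pvStepA (PySem.Dict.empty, (none, []))).1
        ((tokens.zip tags).foldl pvStepA (PySem.Dict.empty, (none, []))).2
      = pvLoopB tokens tags (min tokens.length tags.length) (min tokens.length tags.length) 0 PySem.Dict.empty := by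
    rw [← hmin, h2]
    exact h1
  show PySem.Str.join " " ((PySem.Str.split₀ template).map (fun t =>
      (pvFlushA ((tokens.zip tags).foldl pvStepA (PySem.Dict.empty, (none, []))).1
        ((tokens.zip tags).foldl pvStepA (PySem.Dict.empty, (none, []))).2).getD t t))
    = PySem.Str.join " " ((PySem.Str.split₀ template).map (fun t =>
      (pvLoopB tokens tags (min tokens.length tags.length) (min tokens.length tags.length) 0 PySem.Dict.empty).getD t t))
  rw [hd]
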